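-- pv_equiv track=rewrite | github.com/arditbe/AINARA | run/ainara.py | _clean_generated
-- ===== SOURCE A (Python) =====
-- def _clean_generated(text: str):
--
--     toks = text.strip().split()
--     if not toks:
--         return ""
--
--     out = []
--     prev = None
--     count = 0
--     for t in toks:
--         if t == prev:
--             count += 1
--         else:
--             prev = t
--             count = 1
--         if count <= 3:
--             out.append(t)
--     ans = " ".join(out).strip()
--
--     if len(ans.split()) <= 1:
--         return ans
--     if len(set(ans.split())) <= 2 and len(ans.split()) >= 3:
--         return ""
--     return ans
-- ===== SOURCE B (Python) =====
-- def _clean_generated(text: str):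
--     toks = text.strip().split()
--     out = []
--     rest = toks
--     while rest:
--         t = rest[0]
--         k = 1
--         while k < len(rest) and rest[k] == t:
--             k += 1
--         out += [t] * min(k, 3)
--         rest = rest[k:]
--     if len(out) >= 3 and len(set(out)) <= 2:
--         return ""
--     return " ".join(out)
-- ===== Notes on version B (the rewrite author's own statement) =====
-- stated objective: idiomatic
-- what changed: B replaces A's prev/count state machine with a group-runs-then-cap traversal (maximal run of the leading token, keep min(run,3) copies), and tests degeneracy directly on the token list instead of re-splitting the joined string, dropping A's redundant early length<=1 return.
import Mathlib
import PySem

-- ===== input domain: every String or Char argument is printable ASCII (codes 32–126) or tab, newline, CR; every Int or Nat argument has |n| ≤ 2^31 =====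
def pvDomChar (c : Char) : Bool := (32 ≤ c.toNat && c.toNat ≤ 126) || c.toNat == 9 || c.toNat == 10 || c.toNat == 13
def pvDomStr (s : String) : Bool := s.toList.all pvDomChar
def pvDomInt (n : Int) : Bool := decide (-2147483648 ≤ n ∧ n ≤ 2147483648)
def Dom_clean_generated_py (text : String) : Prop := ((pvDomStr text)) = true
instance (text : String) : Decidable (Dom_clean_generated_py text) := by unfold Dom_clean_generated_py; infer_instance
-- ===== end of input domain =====

-- B collapses runs of repeated tokens by grouping (min(run,3) copies per run) instead of A's
-- prev/count state machine, and tests degeneracy on the token list directly instead of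
-- re-splitting the joined string; same return value, simpler decomposition.

-- ===== PORT A =====
-- one loop iteration of A: update (out, prev, count) for token t
def pvStepA (st : List String × Option String × Int) (t : String) :
    List String × Option String × Int :=
  let (out, prev, count) := st
  let (prev', count') := if some t == prev then (prev, count + 1) else (some t, (1 : Int))
  if count' ≤ 3 then (out ++ [t], prev', count') else (out, prev', count')

def clean_generated_py (text : String) : String :=
  let toks := PySem.Str.split₀ (PySem.Str.strip text)
  if toks.isEmpty then ""
  else
    let out := (toks.foldl pvStepA ([], none, 0)).1
    let ans := PySem.Str.strip (PySem.Str.join " " out)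
    if (PySem.Str.split₀ ans).length ≤ 1 then ans
    else if (PySem.Set.ofList (PySem.Str.split₀ ans)).length ≤ 2 ∧
            3 ≤ (PySem.Str.split₀ ans).length then ""
    else ans

-- ===== PORT B =====
-- B's run loop: take the maximal run of the leading token, keep at most three copies
def pvCapRuns : List String → List String
  | [] => []
  | t :: rest =>
    let k := (rest.takeWhile (· == t)).length + 1
    List.replicate (min k 3) t ++ pvCapRuns (rest.dropWhile (· == t))
termination_by l => l.length
decreasing_by
  have := List.length_dropWhile_le (fun x => x == t) rest
  simp only [List.length_cons]
  omega

def clean_generated_py_alt (text : String) : String :=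
  let out := pvCapRuns (PySem.Str.split₀ (PySem.Str.strip text))
  if 3 ≤ out.length ∧ (PySem.Set.ofList out).length ≤ 2 then ""
  else PySem.Str.join " " out

-- ===== PRECONDITION & SPEC =====
def Spec_clean_generated_py (text : String) (out : String) : Prop := out = clean_generated_py_alt text
instance (text : String) (out : String) : Decidable (Spec_clean_generated_py text out) := by unfold Spec_clean_generated_py; infer_instance

-- ===== CLAIM (what is proved, stated in full; the proofs are below) =====
def Claim_equal_clean_generated_py : Prop := ∀ (text : String), Dom_clean_generated_py text → Spec_clean_generated_py text (clean_generated_py text)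

-- ===== LEMMAS AND PROOFS =====

def pvClean (t : List Char) : Prop := t ≠ [] ∧ ∀ c ∈ t, PySem.Chars.isspace c = false

lemma pv_go_clean (s : List Char) : ∀ (cur : List Char) (acc : List (List Char)),
    (∀ c ∈ cur, PySem.Chars.isspace c = false) → (∀ t ∈ acc, pvClean t) →
    ∀ t ∈ PySem.Chars.split₀.go s cur acc, pvClean t := by
  induction s with
  | nil =>
    intro cur acc hcur hacc t ht
    simp only [PySem.Chars.split₀.go] at ht
    split at ht
    · exact hacc t (by simpa using ht)
    · rename_i hem
      rcases (by simpa using ht) with h | h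
      · exact hacc t (by simpa using h)
      · subst h
        have hne : cur ≠ [] := by simpa [List.isEmpty_iff] using hem
        exact ⟨by simpa using hne, fun c hc => hcur c (List.mem_reverse.1 hc)⟩
  | cons c rest ih =>
    intro cur acc hcur hacc t ht
    simp only [PySem.Chars.split₀.go] at ht
    split at ht
    · split at ht
      · exact ih [] acc (by simp) hacc t ht
      · rename_i hsp hem
        refine ih [] (cur.reverse :: acc) (by simp) ?_ t ht
        intro u hu
        rcases List.mem_cons.1 hu with h | h
        · subst h
          have hne : cur ≠ [] := by simpa [List.isEmpty_iff] using hem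
          exact ⟨by simpa using hne, fun d hd => hcur d (List.mem_reverse.1 hd)⟩
        · exact hacc u h
    · rename_i hsp
      refine ih (c :: cur) acc ?_ hacc t ht
      intro d hd
      rcases List.mem_cons.1 hd with h | h
      · subst h; exact Bool.eq_false_iff.mpr hsp
      · exact hcur d h

lemma pv_split₀_clean (s : List Char) : ∀ t ∈ PySem.Chars.split₀ s, pvClean t :=
  pv_go_clean s [] [] (by simp) (by simp)

lemma pv_go_chunk (tok : List Char) (htok : ∀ c ∈ tok, PySem.Chars.isspace c = false) :
    ∀ (s cur : List Char) (acc : List (List Char)),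
    PySem.Chars.split₀.go (tok ++ s) cur acc = PySem.Chars.split₀.go s (tok.reverse ++ cur) acc := by
  induction tok with
  | nil => simp
  | cons c t ih =>
    intro s cur acc
    have hc : PySem.Chars.isspace c = false := htok c (by simp)
    simp only [List.cons_append, PySem.Chars.split₀.go, hc, Bool.false_eq_true, if_false]
    rw [ih (fun d hd => htok d (by simp [hd])) s (c :: cur) acc]
    simp

lemma pv_go_join (L : List (List Char)) : ∀ (acc : List (List Char)), (∀ t ∈ L, pvClean t) →
    PySem.Chars.split₀.go (PySem.Chars.join [' '] L) [] acc = acc.reverse ++ L := by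
  induction L with
  | nil =>
    intro acc _
    simp [PySem.Chars.join, List.intercalate, PySem.Chars.split₀.go]
  | cons t rest ih =>
    intro acc hcl
    have ht := hcl t (by simp)
    cases rest with
    | nil =>
      have : PySem.Chars.join [' '] [t] = t ++ [] := by simp [PySem.Chars.join, List.intercalate]
      rw [this, pv_go_chunk t ht.2]
      simp only [PySem.Chars.split₀.go, List.append_nil]
      rw [if_neg (by simpa [List.isEmpty_iff] using ht.1)]
      simp
    | cons u rest' =>
      have hj : PySem.Chars.join [' '] (t :: u :: rest') =
          t ++ (' ' :: PySem.Chars.join [' '] (u :: rest')) := by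
        simp [PySem.Chars.join, List.intercalate, List.intersperse]
      rw [hj, pv_go_chunk t ht.2]
      simp only [PySem.Chars.split₀.go, List.append_nil]
      rw [if_pos (by decide), if_neg (by simpa [List.isEmpty_iff] using ht.1)]
      rw [ih (t.reverse.reverse :: acc) (fun v hv => hcl v (by simp [hv]))]
      simp

lemma pv_split₀_join (L : List (List Char)) (h : ∀ t ∈ L, pvClean t) :
    PySem.Chars.split₀ (PySem.Chars.join [' '] L) = L := by
  unfold PySem.Chars.split₀
  rw [pv_go_join L [] h]
  simp

lemma pv_join_ne_nil (L : List (List Char)) (hL : L ≠ []) (h : ∀ t ∈ L, pvClean t) :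
    PySem.Chars.join [' '] L ≠ [] := by
  cases L with
  | nil => exact absurd rfl hL
  | cons t rest =>
    have ht := (h t (by simp)).1
    cases rest with
    | nil => simpa [PySem.Chars.join, List.intercalate] using ht
    | cons u rest' =>
      simp only [PySem.Chars.join, List.intercalate, List.intersperse]
      simp [ht]

lemma pv_join_getLast (L : List (List Char)) (h : ∀ t ∈ L, pvClean t) :
    ∀ c, (PySem.Chars.join [' '] L).getLast? = some c → PySem.Chars.isspace c = false := by
  induction L with
  | nil => intro c hc; simp [PySem.Chars.join, List.intercalate] at hc
  | cons t rest ih =>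
    intro c hc
    have ht := h t (by simp)
    cases rest with
    | nil =>
      simp only [PySem.Chars.join, List.intercalate] at hc
      simp at hc
      exact ht.2 c (List.mem_of_getLast? hc)
    | cons u rest' =>
      have hj : PySem.Chars.join [' '] (t :: u :: rest') =
          t ++ (' ' :: PySem.Chars.join [' '] (u :: rest')) := by
        simp [PySem.Chars.join, List.intercalate, List.intersperse]
      rw [hj, List.getLast?_append_of_ne_nil t (by simp)] at hc
      have hne : PySem.Chars.join [' '] (u :: rest') ≠ [] :=
        pv_join_ne_nil (u :: rest') (by simp) (fun v hv => h v (by simp [hv]))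
      obtain ⟨y, ys, hys⟩ := List.exists_cons_of_ne_nil hne
      rw [hys, List.getLast?_cons_cons, ← hys] at hc
      exact ih (fun v hv => h v (by simp [hv])) c hc

lemma pv_strip_join (L : List (List Char)) (h : ∀ t ∈ L, pvClean t) :
    PySem.Chars.strip (PySem.Chars.join [' '] L) = PySem.Chars.join [' '] L := by
  cases L with
  | nil => simp [PySem.Chars.join, List.intercalate, PySem.Chars.strip, PySem.Chars.lstrip, PySem.Chars.rstrip]
  | cons t rest =>
    have ht := h t (by simp)
    have hlstrip : PySem.Chars.lstrip (PySem.Chars.join [' '] (t :: rest)) =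
        PySem.Chars.join [' '] (t :: rest) := by
      obtain ⟨c, t', hct⟩ := List.exists_cons_of_ne_nil ht.1
      have hc : PySem.Chars.isspace c = false := ht.2 c (by simp [hct])
      have hhead : ∃ s, PySem.Chars.join [' '] (t :: rest) = c :: s := by
        cases rest with
        | nil => exact ⟨t', by simp [PySem.Chars.join, List.intercalate, hct]⟩
        | cons u rest' =>
          refine ⟨t' ++ ' ' :: PySem.Chars.join [' '] (u :: rest'), ?_⟩
          simp [PySem.Chars.join, List.intercalate, List.intersperse, hct]
      obtain ⟨s, hs⟩ := hhead
      rw [hs]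
      simp [PySem.Chars.lstrip, hc]
    have hrstrip : ∀ (x : List Char), (∀ c, x.getLast? = some c → PySem.Chars.isspace c = false) →
        PySem.Chars.rstrip x = x := by
      intro x hx
      cases hrev : x.reverse with
      | nil =>
        have : x = [] := by simpa using congrArg List.reverse hrev
        simp [PySem.Chars.rstrip, this]
      | cons c s =>
        have : x.getLast? = some c := by
          rw [← List.head?_reverse, hrev]; rfl
        have hc := hx c this
        simp only [PySem.Chars.rstrip, hrev, List.dropWhile_cons, hc, Bool.false_eq_true, if_false]
        rw [← hrev, List.reverse_reverse]
    rw [PySem.Chars.strip, hlstrip, hrstrip _ (pv_join_getLast (t :: rest) h)]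

lemma pv_capRuns_subset (l : List String) : ∀ x ∈ pvCapRuns l, x ∈ l := by
  induction l using pvCapRuns.induct with
  | case1 => simp [pvCapRuns]
  | case2 t rest ih =>
    intro x hx
    rw [pvCapRuns] at hx
    rcases List.mem_append.1 hx with h | h
    · simp [List.eq_of_mem_replicate h]
    · exact List.mem_cons_of_mem t ((List.dropWhile_sublist _).subset (ih x h))

lemma pv_rep_succ (t : String) (n a : Nat) :
    t :: List.replicate (min n a) t = List.replicate (min (n + 1) (a + 1)) t := by
  rw [Nat.succ_min_succ, List.replicate_succ]

lemma pv_rep3 (t : String) (n : Nat) :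
    t :: List.replicate (min n 2) t = List.replicate (min (n + 1) 3) t :=
  pv_rep_succ t n 2

lemma pv_fold_run (rest : List String) : ∀ (t : String) (out : List String) (c : Int), 1 ≤ c →
    (rest.foldl pvStepA (out, some t, c)).1 =
      out ++ List.replicate (min (rest.takeWhile (· == t)).length (3 - c).toNat) t
          ++ pvCapRuns (rest.dropWhile (· == t)) := by
  induction rest with
  | nil => intro t out c hc; simp [pvCapRuns]
  | cons x rest ih =>
    intro t out c hc
    by_cases hx : x = t
    · subst hx
      simp only [List.foldl_cons, pvStepA, beq_self_eq_true, if_true]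
      rw [List.takeWhile_cons_of_pos (p := (· == x)) (by simp),
        List.dropWhile_cons_of_pos (p := (· == x)) (by simp), List.length_cons]
      by_cases hc3 : c + 1 ≤ 3
      · have h1 : (3 - (c + 1)).toNat + 1 = (3 - c).toNat := by omega
        rw [if_pos hc3, ih x (out ++ [x]) (c + 1) (by omega), ← h1, ← pv_rep_succ]
        simp
      · have h1 : (3 - (c + 1)).toNat = 0 := by omega
        have h2 : (3 - c).toNat = 0 := by omega
        rw [if_neg hc3, ih x out (c + 1) (by omega)]
        simp [h1, h2]
    · have hbeq : (some x == some t) = false := by simp [hx]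
      simp only [List.foldl_cons, pvStepA, hbeq, Bool.false_eq_true, if_false,
        if_pos (by decide : (1 : Int) ≤ 3)]
      have htw : List.takeWhile (· == t) (x :: rest) = [] :=
        List.takeWhile_cons_of_neg (by simp [hx])
      have hdw : List.dropWhile (· == t) (x :: rest) = x :: rest :=
        List.dropWhile_cons_of_neg (by simp [hx])
      have h2 : ((3 : Int) - 1).toNat = 2 := by decide
      rw [ih x (out ++ [x]) 1 (by decide), htw, hdw, pvCapRuns, h2, ← pv_rep3]
      simp

lemma pv_fold_eq_capRuns (toks : List String) :
    (toks.foldl pvStepA ([], none, 0)).1 = pvCapRuns toks := by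
  cases toks with
  | nil => simp [pvCapRuns]
  | cons t rest =>
    have hbeq : (some t == (none : Option String)) = false := by simp
    simp only [List.foldl_cons, pvStepA, hbeq, Bool.false_eq_true, if_false]
    rw [if_pos (by decide : (1 : Int) ≤ 3)]
    have h2 : ((3 : Int) - 1).toNat = 2 := by decide
    rw [pv_fold_run rest t ([] ++ [t]) 1 (by decide), pvCapRuns, h2, ← pv_rep3]
    simp

-- tokens produced by split() on the String side are clean
lemma pv_split₀_str_clean (s : String) : ∀ t ∈ PySem.Str.split₀ s, pvClean t.toList := by
  intro t ht
  have : t.toList ∈ PySem.Chars.split₀ s.toList := by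
    rw [← PySem.Str.split₀_map_toList]
    exact List.mem_map_of_mem ht
  exact pv_split₀_clean s.toList t.toList this

-- ===== VERDICT (by name: the statement is the Claim_ definition above) =====
theorem clean_generated_py_spec : Claim_equal_clean_generated_py := by
  intro text _
  unfold Spec_clean_generated_py
  simp only [clean_generated_py, clean_generated_py_alt]
  by_cases hemp : (PySem.Str.split₀ (PySem.Str.strip text)).isEmpty
  · rw [if_pos hemp, List.isEmpty_iff.1 hemp]
    have h0 : pvCapRuns [] = [] := by simp [pvCapRuns]
    rw [h0]
    rw [if_neg (by simp)]
    apply String.toList_inj.mp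
    simp [PySem.Chars.join, List.intercalate]
  · rw [if_neg hemp]
    set toks := PySem.Str.split₀ (PySem.Str.strip text) with htoks
    have hclean : ∀ t ∈ pvCapRuns toks, pvClean t.toList := fun t ht =>
      pv_split₀_str_clean (PySem.Str.strip text) t (pv_capRuns_subset toks t ht)
    set out := pvCapRuns toks with hout
    have hcleanL : ∀ u ∈ out.map String.toList, pvClean u := by
      intro u hu
      obtain ⟨t, ht, rfl⟩ := List.mem_map.1 hu
      exact hclean t ht
    have hjoin : (PySem.Str.join " " out).toList =
        PySem.Chars.join [' '] (out.map String.toList) := by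
      have hsp : (" " : String).toList = [' '] := by decide
      rw [PySem.Str.toList_join, hsp]
    have hans : PySem.Str.strip (PySem.Str.join " " out) = PySem.Str.join " " out := by
      apply String.toList_inj.mp
      rw [PySem.Str.toList_strip, hjoin, pv_strip_join _ hcleanL]
    have hsplit : PySem.Str.split₀ (PySem.Str.join " " out) = out := by
      unfold PySem.Str.split₀
      rw [hjoin, pv_split₀_join _ hcleanL]
      simp [Function.comp_def, String.ofList_toList]
    rw [pv_fold_eq_capRuns toks, ← hout, hans, hsplit]
    by_cases h1 : out.length ≤ 1
    · rw [if_pos h1, if_neg (by omega)]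
    · rw [if_neg h1]
      by_cases h2 : (PySem.Set.ofList out).length ≤ 2 ∧ 3 ≤ out.length
      · rw [if_pos h2, if_pos ⟨h2.2, h2.1⟩]
      · rw [if_neg h2, if_neg (fun h => h2 ⟨h.2, h.1⟩)]
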